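-- pv_equiv track=rewrite | github.com/elfisworking/PY_Leet | 1269.py | numWays_dp
-- ===== SOURCE A (Python) =====
-- def numWays_dp(steps: int, arrLen: int) -> int:
--     maxCol = min(steps//2+1,arrLen-1)
--     dp = [[0 for _ in range(maxCol+1)]for _ in range(steps+1)]
--     dp[0][0] = 1
--     for i in range(1,steps+1):
--         for j in range(0,maxCol+1):
--             if j==0:
--                 dp[i][j] = (dp[i-1][j]+dp[i-1][j+1])%(10**9+7)
--             elif j == maxCol:
--                 dp[i][j]  = (dp[i-1][j]+dp[i-1][j-1])%(10**9+7)
--             else: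
--                 dp[i][j] = ((dp[i-1][j] + dp[i-1][j-1])%1000000007 + dp[i-1][j+1])%1000000007
--     return dp[steps][0]
-- ===== SOURCE B (Python) =====
-- MOD = 1000000007
--
-- def numWays_dp(steps: int, arrLen: int) -> int:
--     # Matrix exponentiation: the answer is entry (0,0) of T**steps, where T is
--     # the tridiagonal transition matrix of the clipped line graph.
--     m = min(steps // 2 + 1, arrLen - 1) + 1
--     T = [[1 if abs(i - j) <= 1 else 0 for j in range(m)] for i in range(m)]
--
--     def matmul(A, B):
--         return [[sum(A[i][k] * B[k][j] for k in range(m)) % MOD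
--                  for j in range(m)] for i in range(m)]
--
--     P = [[1 if i == j else 0 for j in range(m)] for i in range(m)]
--     e = steps
--     while e > 0:
--         if e & 1:
--             P = matmul(P, T)
--         T = matmul(T, T)
--         e >>= 1
--     return P[0][0]
-- ===== Notes on version B (the rewrite author's own statement) =====
-- stated objective: alternative
-- what changed: replaces the step-by-step DP table with matrix exponentiation: the answer is entry (0,0) of the tridiagonal transition matrix raised to the power steps, computed by binary exponentiation by squaring; this trades the per-step row updates for O(log steps) matrix multiplications (much faster for small arrLen with huge steps, slower when min(steps,arrLen) itself is large)
-- outside the precondition, e.g. on numWays_dp(0, 0): A raises IndexError, B raises IndexError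
import Mathlib
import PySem

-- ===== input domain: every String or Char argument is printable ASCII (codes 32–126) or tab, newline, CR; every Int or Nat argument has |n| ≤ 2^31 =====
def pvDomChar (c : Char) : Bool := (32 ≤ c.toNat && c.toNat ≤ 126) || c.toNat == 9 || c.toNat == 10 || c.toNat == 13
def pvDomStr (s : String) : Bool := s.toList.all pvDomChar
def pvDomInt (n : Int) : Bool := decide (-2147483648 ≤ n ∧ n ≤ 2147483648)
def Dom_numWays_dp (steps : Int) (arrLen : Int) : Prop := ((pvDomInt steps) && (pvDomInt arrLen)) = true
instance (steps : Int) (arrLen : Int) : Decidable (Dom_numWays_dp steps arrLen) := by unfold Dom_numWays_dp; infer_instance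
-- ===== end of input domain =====

-- B replaces A's step-by-step DP table by matrix exponentiation: the answer is
-- entry (0,0) of the tridiagonal transition matrix raised to the power `steps`,
-- computed by binary exponentiation by squaring (objective: alternative algorithm).

def pvP : Int := 1000000007

-- ===== PORT A =====
-- literal transliteration of A's 2D-table DP (the mutable Python lists are Arrays,
-- updated entry by entry exactly as A does); loop counters are Nat (the Python
-- range bounds are nonnegative on Pre_); `%` on Int with the positive modulus pvP
-- agrees exactly with Python's `%`.
def numWays_dp (steps : Int) (arrLen : Int) : Int :=
  let maxCol : Int := min (PySem.Int.floordiv steps 2 + 1) (arrLen - 1)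
  let m : Nat := (maxCol + 1).toNat
  let dp0 : Array (Array Int) :=
    (Array.replicate (steps + 1).toNat (Array.replicate m 0)).setIfInBounds 0
      ((Array.replicate m 0).setIfInBounds 0 1)
  let dp := (List.range' 1 steps.toNat).foldl (fun dp i =>
    (List.range m).foldl (fun dp (j : Nat) =>
      let prev := dp.getD (i - 1) #[]
      let v : Int :=
        if j = 0 then (prev.getD j 0 + prev.getD (j + 1) 0) % pvP
        else if (j : Int) = maxCol then (prev.getD j 0 + prev.getD (j - 1) 0) % pvP
        else ((prev.getD j 0 + prev.getD (j - 1) 0) % pvP + prev.getD (j + 1) 0) % pvP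
      dp.setIfInBounds i ((dp.getD i #[]).setIfInBounds j v)) dp) dp0
  (dp.getD steps.toNat #[]).getD 0 0

-- ===== PORT B =====
-- literal transliteration of Source B: build the tridiagonal transition matrix T and
-- the identity P as m×m lists, then binary exponentiation (while e > 0) with the
-- hand-written matmul (sum over range(m), then % MOD).
def pvMatMul (m : Nat) (A B : List (List Int)) : List (List Int) :=
  (List.range m).map (fun i => (List.range m).map (fun j =>
    (((List.range m).map (fun k =>
        ((A.getD i []).getD k 0) * ((B.getD k []).getD j 0))).sum) % pvP))

-- the while loop of Source B; e >>= 1 halves e, so e iterations always suffice: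
-- fuel (first Nat argument, initially e itself) only makes the recursion structural
def pvFastPow (m : Nat) : Nat → Nat → List (List Int) → List (List Int) → List (List Int)
  | 0, _, P, _ => P
  | _+1, 0, P, _ => P
  | fuel+1, e+1, P, T =>
      pvFastPow m fuel ((e+1)/2) (if (e+1) % 2 = 1 then pvMatMul m P T else P) (pvMatMul m T T)

def pvTInit (m : Nat) : List (List Int) :=
  (List.range m).map (fun (i : Nat) => (List.range m).map (fun (j : Nat) =>
    if |((i : Int)) - ((j : Int))| ≤ 1 then (1 : Int) else 0))

def pvIdent (m : Nat) : List (List Int) :=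
  (List.range m).map (fun i => (List.range m).map (fun j =>
    if i = j then (1 : Int) else 0))

def numWays_dp_alt (steps : Int) (arrLen : Int) : Int :=
  let m : Nat := (min (PySem.Int.floordiv steps 2 + 1) (arrLen - 1) + 1).toNat
  ((pvFastPow m steps.toNat steps.toNat (pvIdent m) (pvTInit m)).getD 0 []).getD 0 0

-- ===== PRECONDITION & SPEC =====
-- Pre_ excludes exactly the inputs on which the Python A raises IndexError:
-- steps < 0, or arrLen ≤ 1 with steps ≥ 1 (the row is too short for dp[i-1][j+1]),
-- or arrLen ≤ 0 with steps = 0 (dp[0][0] = 1 on an empty row).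
def Pre_numWays_dp (steps : Int) (arrLen : Int) : Prop :=
  (0 ≤ steps ∧ 2 ≤ arrLen) ∨ (steps = 0 ∧ arrLen = 1)
instance (steps : Int) (arrLen : Int) : Decidable (Pre_numWays_dp steps arrLen) := by
  unfold Pre_numWays_dp; infer_instance

def pvWitness_numWays_dp : Int × Int := (4, 2)

def Spec_numWays_dp (steps : Int) (arrLen : Int) (out : Int) : Prop := out = numWays_dp_alt steps arrLen
instance (steps : Int) (arrLen : Int) (out : Int) : Decidable (Spec_numWays_dp steps arrLen out) := by unfold Spec_numWays_dp; infer_instance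

-- ===== CLAIM (what is proved, stated in full; the proofs are below) =====
def Claim_equal_numWays_dp : Prop := ∀ (steps : Int) (arrLen : Int), Dom_numWays_dp steps arrLen → Pre_numWays_dp steps arrLen → Spec_numWays_dp steps arrLen (numWays_dp steps arrLen)

-- ===== LEMMAS AND PROOFS =====

-- ---------- A side: the table DP computes iterated row maps ----------

-- A's branch value for column j, reading the previous row.
def pvValA (maxCol : Int) (prev : List Int) (j : Nat) : Int :=
  if j = 0 then (prev.getD j 0 + prev.getD (j + 1) 0) % pvP
  else if (j : Int) = maxCol then (prev.getD j 0 + prev.getD (j - 1) 0) % pvP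
  else ((prev.getD j 0 + prev.getD (j - 1) 0) % pvP + prev.getD (j + 1) 0) % pvP

-- The new row A's inner loop writes.
def pvRowA (maxCol : Int) (prev : List Int) : List Int :=
  (List.range (maxCol + 1).toNat).map (pvValA maxCol prev)

-- A's inner-loop body (writing column j of row i).
def pvInnerF (maxCol : Int) (i : Nat) (dp : List (List Int)) (j : Nat) : List (List Int) :=
  dp.set i ((dp.getD i []).set j (pvValA maxCol (dp.getD (i - 1) []) j))

theorem pvSet_getD_self (l : List (List Int)) (i : Nat) (h : i < l.length) :
    l.set i (l.getD i []) = l := by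
  rw [List.getD_eq_getElem _ _ h, List.set_getElem_self]

theorem pvGetD_set_ne (l : List (List Int)) (i k : Nat) (x : List Int) (h : k ≠ i) :
    (l.set i x).getD k [] = l.getD k [] := by
  simp [List.getD, List.getElem?_set_ne (by omega : i ≠ k)]

theorem pvGetD_set_self (l : List (List Int)) (i : Nat) (x : List Int) (h : i < l.length) :
    (l.set i x).getD i [] = x := by
  simp [List.getD, h]

theorem pvTake_set (r : List Int) (j : Nat) (v : Int) (h : j < r.length) :
    (r.set j v).take (j + 1) = r.take j ++ [v] := by
  rw [List.set_eq_take_append_cons_drop, if_pos h, List.take_append]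
  rw [List.take_take, Nat.min_eq_right (by omega), List.length_take,
    Nat.min_eq_left (by omega), (by omega : j + 1 - j = 1)]
  simp

theorem pvInner_aux (maxCol : Int) (i : Nat) (hi : 1 ≤ i) :
    ∀ (k j : Nat) (dp : List (List Int)), i < dp.length → (dp.getD i []).length = j + k →
      (List.range' j k).foldl (pvInnerF maxCol i) dp =
        dp.set i ((dp.getD i []).take j ++ (List.range' j k).map (pvValA maxCol (dp.getD (i - 1) []))) := by
  intro k
  induction k with
  | zero =>
    intro j dp hlen hrow
    simp only [List.range'_zero, List.foldl_nil, List.map_nil, List.append_nil]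
    rw [List.take_of_length_le (by omega), pvSet_getD_self _ _ hlen]
  | succ k ih =>
    intro j dp hlen hrow
    rw [List.range'_succ, List.foldl_cons]
    have hj : j < (dp.getD i []).length := by omega
    have hlen' : i < (pvInnerF maxCol i dp j).length := by
      rw [pvInnerF, List.length_set]; exact hlen
    have hrow' : ((pvInnerF maxCol i dp j).getD i []).length = (j + 1) + k := by
      rw [pvInnerF, pvGetD_set_self _ _ _ hlen, List.length_set]; omega
    rw [ih (j + 1) _ hlen' hrow']
    have hprev : (pvInnerF maxCol i dp j).getD (i - 1) [] = dp.getD (i - 1) [] := by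
      rw [pvInnerF, pvGetD_set_ne _ _ _ _ (by omega)]
    have hrowi : (pvInnerF maxCol i dp j).getD i [] =
        (dp.getD i []).set j (pvValA maxCol (dp.getD (i - 1) []) j) := by
      rw [pvInnerF, pvGetD_set_self _ _ _ hlen]
    rw [hprev, hrowi, pvInnerF, List.set_set, pvTake_set _ _ _ hj]
    rw [List.append_assoc]
    rfl

theorem pvInner (maxCol : Int) (i : Nat) (dp : List (List Int)) (hi : 1 ≤ i)
    (hlen : i < dp.length) (hrow : (dp.getD i []).length = (maxCol + 1).toNat) :
    (List.range (maxCol + 1).toNat).foldl (pvInnerF maxCol i) dp =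
      dp.set i (pvRowA maxCol (dp.getD (i - 1) [])) := by
  rw [List.range_eq_range', pvInner_aux maxCol i hi _ 0 dp hlen (by omega)]
  simp [pvRowA, List.range_eq_range']

-- the table after outer iterations 1..t
def pvTbl (S M : Nat) (maxCol : Int) (t : Nat) : List (List Int) :=
  (List.range S).map (fun k =>
    if k ≤ t then (pvRowA maxCol)^[k] ((List.replicate M 0).set 0 1) else List.replicate M 0)

theorem pvTbl_length (S M : Nat) (maxCol : Int) (t : Nat) :
    (pvTbl S M maxCol t).length = S := by simp [pvTbl]

theorem pvTbl_getD (S M : Nat) (maxCol : Int) (t k : Nat) (hk : k < S) :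
    (pvTbl S M maxCol t).getD k [] =
      if k ≤ t then (pvRowA maxCol)^[k] ((List.replicate M 0).set 0 1) else List.replicate M 0 := by
  simp [pvTbl, List.getD, hk]

theorem pvTbl_zero (S M : Nat) (maxCol : Int) :
    (List.replicate S (List.replicate M 0)).set 0 ((List.replicate M 0).set 0 1) =
      pvTbl S M maxCol 0 := by
  apply List.ext_getElem?
  intro k
  rcases Nat.lt_or_ge k S with hk | hk
  · rcases Nat.eq_zero_or_pos k with rfl | hpos
    · rw [List.getElem?_set_self (by simpa using hk)]
      simp [pvTbl, hk]
    · rw [List.getElem?_set_ne (by omega)]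
      have hne : k ≠ 0 := by omega
      simp [pvTbl, hk, hne]
  · rw [List.getElem?_eq_none (by simpa using hk),
      List.getElem?_eq_none (by rw [pvTbl_length]; exact hk)]

theorem pvTbl_set (S M : Nat) (maxCol : Int) (t : Nat) (ht : t + 1 < S) :
    (pvTbl S M maxCol t).set (t + 1)
        ((pvRowA maxCol)^[t + 1] ((List.replicate M 0).set 0 1)) =
      pvTbl S M maxCol (t + 1) := by
  apply List.ext_getElem?
  intro k
  rcases Nat.lt_or_ge k S with hk | hk
  · by_cases hkt : k = t + 1
    · subst hkt
      rw [List.getElem?_set_self (by rw [pvTbl_length]; exact ht)]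
      simp [pvTbl, hk]
    · rw [List.getElem?_set_ne (by omega)]
      simp only [pvTbl, List.getElem?_map, List.getElem?_range, hk, Option.map_some]
      congr 1
      split_ifs with h1 h2 <;> first | rfl | omega
  · rw [List.getElem?_eq_none (by rw [List.length_set, pvTbl_length]; exact hk),
      List.getElem?_eq_none (by rw [pvTbl_length]; exact hk)]

theorem pvOuter (maxCol : Int) (S : Nat) :
    ∀ t : Nat, t < S →
      (List.range' 1 t).foldl
        (fun dp i => (List.range (maxCol + 1).toNat).foldl (pvInnerF maxCol i) dp)
        (pvTbl S (maxCol + 1).toNat maxCol 0) = pvTbl S (maxCol + 1).toNat maxCol t := by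
  intro t
  induction t with
  | zero => intro _; rfl
  | succ t ih =>
    intro ht
    have hconc : List.range' 1 (t + 1) = List.range' 1 t ++ [1 + t] := by
      have := List.range'_concat (s := 1) (n := t) (step := 1)
      simpa using this
    rw [hconc, List.foldl_append, ih (by omega), List.foldl_cons, List.foldl_nil]
    have h1t : 1 + t = t + 1 := by omega
    rw [h1t]
    rw [pvInner maxCol (t + 1) _ (by omega) (by rw [pvTbl_length]; omega)
      (by rw [pvTbl_getD _ _ _ _ _ (by omega), if_neg (by omega : ¬ t + 1 ≤ t)]; simp)]
    simp only [Nat.add_sub_cancel]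
    rw [pvTbl_getD _ _ _ _ _ (by omega), if_pos (Nat.le_refl t)]
    rw [← Function.iterate_succ_apply' (pvRowA maxCol)]
    exact pvTbl_set _ _ _ _ ht

-- bridge: the Array table of port A projects onto the List table the lemmas use
def pvTL (dp : Array (Array Int)) : List (List Int) := dp.toList.map Array.toList

def pvValAA (maxCol : Int) (prev : Array Int) (j : Nat) : Int :=
  if j = 0 then (prev.getD j 0 + prev.getD (j + 1) 0) % pvP
  else if (j : Int) = maxCol then (prev.getD j 0 + prev.getD (j - 1) 0) % pvP
  else ((prev.getD j 0 + prev.getD (j - 1) 0) % pvP + prev.getD (j + 1) 0) % pvP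

def pvInnerFA (maxCol : Int) (i : Nat) (dp : Array (Array Int)) (j : Nat) : Array (Array Int) :=
  dp.setIfInBounds i ((dp.getD i #[]).setIfInBounds j (pvValAA maxCol (dp.getD (i - 1) #[]) j))

def pvDP0A (steps : Int) (m : Nat) : Array (Array Int) :=
  (Array.replicate (steps + 1).toNat (Array.replicate m 0)).setIfInBounds 0
    ((Array.replicate m 0).setIfInBounds 0 1)

theorem pvAGetD_int (a : Array Int) (i : Nat) : a.getD i 0 = a.toList.getD i 0 := by
  simp [Array.getD_eq_getD_getElem?, List.getD, Array.getElem?_toList]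

theorem pvRowTL (dp : Array (Array Int)) (i : Nat) :
    (dp.getD i #[]).toList = (pvTL dp).getD i [] := by
  simp only [pvTL, Array.getD_eq_getD_getElem?, List.getD, List.getElem?_map,
    Array.getElem?_toList]
  cases dp[i]? <;> simp

theorem pvSetTL (dp : Array (Array Int)) (i : Nat) (r : Array Int) :
    pvTL (dp.setIfInBounds i r) = (pvTL dp).set i r.toList := by
  simp [pvTL, Array.toList_setIfInBounds, List.map_set]

theorem pvValAA_eq (maxCol : Int) (dp : Array (Array Int)) (i j : Nat) :
    pvValAA maxCol (dp.getD (i - 1) #[]) j = pvValA maxCol ((pvTL dp).getD (i - 1) []) j := by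
  simp only [pvValAA, pvValA, pvAGetD_int, pvRowTL]

theorem pvInnerFA_TL (maxCol : Int) (i : Nat) (dp : Array (Array Int)) (j : Nat) :
    pvTL (pvInnerFA maxCol i dp j) = pvInnerF maxCol i (pvTL dp) j := by
  rw [pvInnerFA, pvInnerF, pvSetTL, Array.toList_setIfInBounds, pvRowTL, pvValAA_eq]

theorem pvTL_dp0 (steps : Int) (m : Nat) :
    pvTL (pvDP0A steps m) =
      (List.replicate (steps + 1).toNat (List.replicate m 0)).set 0
        ((List.replicate m 0).set 0 1) := by
  simp [pvTL, pvDP0A, Array.toList_setIfInBounds, List.map_set, List.map_replicate]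

theorem pvFoldl_hom {α β : Type} (π : α → β) (f' : α → Nat → α) (f : β → Nat → β)
    (h : ∀ a x, π (f' a x) = f (π a) x) (l : List Nat) (a : α) :
    π (l.foldl f' a) = l.foldl f (π a) := by
  induction l generalizing a with
  | nil => rfl
  | cons b t ih => simp only [List.foldl_cons, ih, h]

theorem pvA_unfold (steps arrLen : Int) :
    numWays_dp steps arrLen =
      (((List.range' 1 steps.toNat).foldl
          (fun dp i =>
            (List.range ((min (PySem.Int.floordiv steps 2 + 1) (arrLen - 1) + 1).toNat)).foldl
              (pvInnerF (min (PySem.Int.floordiv steps 2 + 1) (arrLen - 1)) i) dp)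
          ((List.replicate (steps + 1).toNat
              (List.replicate ((min (PySem.Int.floordiv steps 2 + 1) (arrLen - 1) + 1).toNat) 0)).set 0
            ((List.replicate ((min (PySem.Int.floordiv steps 2 + 1) (arrLen - 1) + 1).toNat) 0).set 0
              1))).getD steps.toNat []).getD 0 0 := by
  have h0 : numWays_dp steps arrLen =
      (((List.range' 1 steps.toNat).foldl
          (fun dp i =>
            (List.range ((min (PySem.Int.floordiv steps 2 + 1) (arrLen - 1) + 1).toNat)).foldl
              (pvInnerFA (min (PySem.Int.floordiv steps 2 + 1) (arrLen - 1)) i) dp)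
          (pvDP0A steps ((min (PySem.Int.floordiv steps 2 + 1) (arrLen - 1) + 1).toNat))).getD
            steps.toNat #[]).getD 0 0 := rfl
  rw [h0, pvAGetD_int, pvRowTL]
  have hh : ∀ (a : Array (Array Int)) (x : Nat),
      pvTL ((List.range ((min (PySem.Int.floordiv steps 2 + 1) (arrLen - 1) + 1).toNat)).foldl
          (pvInnerFA (min (PySem.Int.floordiv steps 2 + 1) (arrLen - 1)) x) a) =
        (List.range ((min (PySem.Int.floordiv steps 2 + 1) (arrLen - 1) + 1).toNat)).foldl
          (pvInnerF (min (PySem.Int.floordiv steps 2 + 1) (arrLen - 1)) x) (pvTL a) :=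
    fun a x => pvFoldl_hom pvTL _ _ (fun a' x' => pvInnerFA_TL _ _ _ _) _ a
  rw [pvFoldl_hom pvTL _
    (fun (dp : List (List Int)) (i : Nat) =>
      (List.range ((min (PySem.Int.floordiv steps 2 + 1) (arrLen - 1) + 1).toNat)).foldl
        (pvInnerF (min (PySem.Int.floordiv steps 2 + 1) (arrLen - 1)) i) dp) hh]
  rw [pvTL_dp0]

-- ---------- casting into ZMod ----------

theorem pvCast_mod (x : Int) : (((x % pvP : Int) : ZMod 1000000007)) = (x : ZMod 1000000007) := by
  have h : pvP = ((1000000007 : Nat) : Int) := rfl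
  rw [h, ZMod.intCast_mod]

theorem pvGetD_map_range {α : Type} (f : Nat → α) (d : α) (M i : Nat) (h : i < M) :
    ((List.range M).map f).getD i d = f i := by
  rw [List.getD_eq_getElem _ _ (by simpa using h)]
  simp

theorem pvSum_range {R : Type} [AddCommMonoid R] (h : Nat → R) (M : Nat) :
    ((List.range M).map h).sum = ∑ k ∈ Finset.range M, h k := by
  induction M with
  | zero => simp
  | succ n ih =>
    rw [List.range_succ, Finset.sum_range_succ, List.map_append, List.sum_append, ih]
    simp

def pvToMat (M : Nat) (A : List (List Int)) : Matrix (Fin M) (Fin M) (ZMod 1000000007) :=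
  Matrix.of fun i j => (((A.getD i.val []).getD j.val 0 : Int) : ZMod 1000000007)

theorem pvToMat_matmul (M : Nat) (A B : List (List Int)) :
    pvToMat M (pvMatMul M A B) = pvToMat M A * pvToMat M B := by
  ext i j
  simp only [pvToMat, Matrix.of_apply, pvMatMul]
  rw [pvGetD_map_range _ _ _ _ i.isLt, pvGetD_map_range _ _ _ _ j.isLt]
  rw [pvCast_mod, Int.cast_list_sum, List.map_map, pvSum_range, Matrix.mul_apply,
    ← Fin.sum_univ_eq_sum_range
      (fun k => (Int.cast ∘ fun k => (A.getD i.val []).getD k 0 * (B.getD k []).getD j.val 0) k) M]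
  apply Finset.sum_congr rfl
  intro k _
  simp [Function.comp, Matrix.of_apply]

theorem pvToMat_one (M : Nat) : pvToMat M (pvIdent M) = 1 := by
  ext i j
  simp only [pvToMat, Matrix.of_apply, pvIdent]
  rw [pvGetD_map_range _ _ _ _ i.isLt, pvGetD_map_range _ _ _ _ j.isLt, Matrix.one_apply]
  split_ifs with h1 h2 h3 <;> simp_all [Fin.ext_iff]

theorem pvFastPow_toMat (M : Nat) (fuel : Nat) : ∀ (e : Nat) (P T : List (List Int)), e ≤ fuel →
    pvToMat M (pvFastPow M fuel e P T) = pvToMat M P * (pvToMat M T) ^ e := by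
  induction fuel with
  | zero =>
    intro e P T he
    have : e = 0 := by omega
    subst this
    simp [pvFastPow]
  | succ fuel ih =>
    intro e P T he
    match e with
    | 0 => simp [pvFastPow]
    | (n+1) =>
      rw [pvFastPow, ih ((n+1)/2) _ _ (by omega), pvToMat_matmul]
      have hsq : pvToMat M T * pvToMat M T = pvToMat M T ^ 2 := (sq _).symm
      by_cases h : (n+1) % 2 = 1
      · rw [if_pos h, pvToMat_matmul, hsq, ← pow_mul, mul_assoc, ← pow_succ']
        congr 2
        omega
      · rw [if_neg h, hsq, ← pow_mul]
        congr 2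
        omega

-- ---------- the tridiagonal matrix and A's row map ----------

theorem pvTInit_apply (M : Nat) (k j : Fin M) :
    pvToMat M (pvTInit M) k j =
      if |(k.val : Int) - (j.val : Int)| ≤ 1 then 1 else 0 := by
  simp only [pvToMat, Matrix.of_apply, pvTInit]
  rw [pvGetD_map_range _ _ _ _ k.isLt, pvGetD_map_range _ _ _ _ j.isLt]
  split_ifs <;> simp

theorem pvSum_ite_eq_val (M : Nat) (v : Fin M → ZMod 1000000007) (c : Nat) :
    (∑ k : Fin M, if k.val = c then v k else 0) = if h : c < M then v ⟨c, h⟩ else 0 := by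
  split
  · next h =>
    have : (∑ k : Fin M, if k.val = c then v k else 0)
        = ∑ k : Fin M, if k = (⟨c, h⟩ : Fin M) then v k else 0 := by
      apply Finset.sum_congr rfl
      intro k _
      congr 1
      simp [Fin.ext_iff]
    rw [this, Finset.sum_ite_eq' Finset.univ (⟨c, h⟩ : Fin M) v]
    simp
  · next h =>
    apply Finset.sum_eq_zero
    intro k _
    rw [if_neg]
    have := k.isLt
    omega

theorem pvSum_ite_pred (M : Nat) (v : Fin M → ZMod 1000000007) (j : Fin M) :
    (∑ k : Fin M, if k.val + 1 = j.val then v k else 0) =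
      if h : 1 ≤ j.val then v ⟨j.val - 1, by omega⟩ else 0 := by
  split
  · next h =>
    have heq : (∑ k : Fin M, if k.val + 1 = j.val then v k else 0)
        = ∑ k : Fin M, if k.val = j.val - 1 then v k else 0 := by
      apply Finset.sum_congr rfl
      intro k _
      congr 1
      simp only [eq_iff_iff]
      omega
    rw [heq, pvSum_ite_eq_val, dif_pos (by omega : j.val - 1 < M)]
  · next h =>
    apply Finset.sum_eq_zero
    intro k _
    rw [if_neg (by omega)]

theorem pvTri_split (M : Nat) (v : Fin M → ZMod 1000000007) (j : Fin M) :
    (∑ k : Fin M, if |(k.val : Int) - (j.val : Int)| ≤ 1 then v k else 0) =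
      (∑ k : Fin M, if k.val = j.val then v k else 0) +
      (∑ k : Fin M, if k.val = j.val + 1 then v k else 0) +
      (∑ k : Fin M, if k.val + 1 = j.val then v k else 0) := by
  rw [← Finset.sum_add_distrib, ← Finset.sum_add_distrib]
  apply Finset.sum_congr rfl
  intro k _
  simp only [abs_le]
  split_ifs <;> first | (simp; done) | omega

theorem pvStep (M : Nat) (hM : 2 ≤ M) (r : List Int) (j : Fin M) :
    (((pvRowA ((M : Int) - 1) r).getD j.val 0 : Int) : ZMod 1000000007) =
      ∑ k : Fin M, ((r.getD k.val 0 : Int) : ZMod 1000000007) * pvToMat M (pvTInit M) k j := by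
  have hMt : (((M : Int) - 1) + 1).toNat = M := by omega
  have hRHS : (∑ k : Fin M, ((r.getD k.val 0 : Int) : ZMod 1000000007) * pvToMat M (pvTInit M) k j)
      = ∑ k : Fin M, if |(k.val : Int) - (j.val : Int)| ≤ 1
          then ((r.getD k.val 0 : Int) : ZMod 1000000007) else 0 := by
    apply Finset.sum_congr rfl
    intro k _
    rw [pvTInit_apply]
    split_ifs <;> simp
  rw [hRHS, pvTri_split, pvSum_ite_eq_val, pvSum_ite_eq_val, pvSum_ite_pred]
  rw [pvRowA, hMt, pvGetD_map_range _ _ _ _ j.isLt]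
  have hj := j.isLt
  by_cases hj0 : j.val = 0
  · rw [pvValA, if_pos hj0]
    rw [dif_pos (by omega : j.val < M), dif_pos (by omega : j.val + 1 < M),
      dif_neg (by omega : ¬ 1 ≤ j.val)]
    rw [pvCast_mod]
    push_cast
    simp [hj0]
  · by_cases hjm : j.val = M - 1
    · rw [pvValA, if_neg hj0, if_pos (by omega : (j.val : Int) = (M : Int) - 1)]
      rw [dif_pos (by omega : j.val < M), dif_neg (by omega : ¬ j.val + 1 < M),
        dif_pos (by omega : 1 ≤ j.val)]
      rw [pvCast_mod]
      push_cast
      ring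
    · rw [pvValA, if_neg hj0, if_neg (by omega : ¬ (j.val : Int) = (M : Int) - 1)]
      rw [dif_pos (by omega : j.val < M), dif_pos (by omega : j.val + 1 < M),
        dif_pos (by omega : 1 ≤ j.val)]
      rw [pvCast_mod, Int.cast_add, pvCast_mod]
      push_cast
      ring

theorem pvIterPow (M : Nat) (hM : 2 ≤ M) (h0 : 0 < M) (n : Nat) :
    ∀ j : Fin M,
      ((((pvRowA ((M : Int) - 1))^[n] ((List.replicate M 0).set 0 1)).getD j.val 0 : Int) : ZMod 1000000007) =
        ((pvToMat M (pvTInit M)) ^ n) ⟨0, h0⟩ j := by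
  induction n with
  | zero =>
    intro j
    simp only [Function.iterate_zero, id_eq, pow_zero, Matrix.one_apply]
    have hlen : j.val < ((List.replicate M (0:Int)).set 0 1).length := by
      simp [j.isLt]
    rw [List.getD_eq_getElem _ _ hlen]
    by_cases hj : j.val = 0
    · have h1 : ((List.replicate M (0:Int)).set 0 1)[j.val]'hlen = 1 := by
        simp [hj]
      rw [h1, if_pos (Fin.ext (by simp [hj]))]
      simp
    · have h1 : ((List.replicate M (0:Int)).set 0 1)[j.val]'hlen = 0 := by
        rw [List.getElem_set_ne (by omega)]
        simp
      rw [h1, if_neg (fun he => hj (by rw [← he]))]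
      simp
  | succ n ih =>
    intro j
    rw [Function.iterate_succ_apply', pvStep M hM _ j]
    have : (∑ k : Fin M, ((((pvRowA ((M : Int) - 1))^[n] ((List.replicate M 0).set 0 1)).getD k.val 0 : Int) : ZMod 1000000007) * pvToMat M (pvTInit M) k j)
        = ∑ k : Fin M, ((pvToMat M (pvTInit M)) ^ n) ⟨0, h0⟩ k * pvToMat M (pvTInit M) k j := by
      apply Finset.sum_congr rfl
      intro k _
      rw [ih k]
    rw [this, ← Matrix.mul_apply, ← pow_succ]

-- ---------- range bounds ----------

theorem pvValA_bound (c : Int) (r : List Int) (j : Nat) :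
    0 ≤ pvValA c r j ∧ pvValA c r j < pvP := by
  have hp : (0:Int) < pvP := by norm_num [pvP]
  rw [pvValA]
  split_ifs <;> exact ⟨Int.emod_nonneg _ (by omega), Int.emod_lt_of_pos _ hp⟩

theorem pvRowA_getD_bound (c : Int) (r : List Int) (hpos : 0 < (c + 1).toNat) :
    0 ≤ (pvRowA c r).getD 0 0 ∧ (pvRowA c r).getD 0 0 < pvP := by
  rw [pvRowA, pvGetD_map_range _ _ _ _ hpos]
  exact pvValA_bound c r 0

theorem pvMatMul_bound (M : Nat) (A B : List (List Int)) :
    0 ≤ ((pvMatMul M A B).getD 0 []).getD 0 0 ∧ ((pvMatMul M A B).getD 0 []).getD 0 0 < pvP := by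
  have hp : (0:Int) < pvP := by norm_num [pvP]
  rcases Nat.eq_zero_or_pos M with hM | hM
  · subst hM
    simp [pvMatMul, pvP]
  · rw [pvMatMul, pvGetD_map_range _ _ _ _ hM, pvGetD_map_range _ _ _ _ hM]
    exact ⟨Int.emod_nonneg _ (by omega), Int.emod_lt_of_pos _ hp⟩

theorem pvFastPow_bound (M : Nat) (fuel : Nat) : ∀ (e : Nat) (P T : List (List Int)),
    0 ≤ (P.getD 0 []).getD 0 0 ∧ (P.getD 0 []).getD 0 0 < pvP →
    0 ≤ ((pvFastPow M fuel e P T).getD 0 []).getD 0 0 ∧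
      ((pvFastPow M fuel e P T).getD 0 []).getD 0 0 < pvP := by
  induction fuel with
  | zero =>
    intro e P T hP
    simpa [pvFastPow] using hP
  | succ fuel ih =>
    intro e P T hP
    match e with
    | 0 => simpa [pvFastPow] using hP
    | (n+1) =>
      rw [pvFastPow]
      apply ih
      split_ifs
      · exact pvMatMul_bound M P T
      · exact hP

theorem pvIdent_bound (M : Nat) :
    0 ≤ ((pvIdent M).getD 0 []).getD 0 0 ∧ ((pvIdent M).getD 0 []).getD 0 0 < pvP := by
  rcases Nat.eq_zero_or_pos M with hM | hM
  · subst hM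
    simp [pvIdent, pvP]
  · rw [pvIdent, pvGetD_map_range _ _ _ _ hM, pvGetD_map_range _ _ _ _ hM]
    norm_num [pvP]

theorem pvInt_eq_of_cast (a b : Int) (ha0 : 0 ≤ a) (ha1 : a < pvP) (hb0 : 0 ≤ b) (hb1 : b < pvP)
    (h : (a : ZMod 1000000007) = (b : ZMod 1000000007)) : a = b := by
  rw [ZMod.intCast_eq_intCast_iff] at h
  obtain ⟨k, hk⟩ := h.dvd
  have hP : pvP = (1000000007 : Int) := rfl
  rw [hP] at ha1 hb1
  omega

-- ===== VERDICT (by name: the statement is the Claim_ definition above) =====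
theorem numWays_dp_spec : Claim_equal_numWays_dp := by
  intro steps arrLen _ hPre
  show numWays_dp steps arrLen = numWays_dp_alt steps arrLen
  rcases hPre with ⟨h0, h2⟩ | ⟨h0, h1⟩
  · -- steps ≥ 0, arrLen ≥ 2
    have hfd : 0 ≤ PySem.Int.floordiv steps 2 := by
      rw [PySem.Int.floordiv_eq_ediv_of_pos (by omega)]
      exact Int.ediv_nonneg h0 (by omega)
    set maxCol : Int := min (PySem.Int.floordiv steps 2 + 1) (arrLen - 1) with hmax
    have hmc1 : 1 ≤ maxCol := le_min (by omega) (by omega)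
    set M : Nat := (maxCol + 1).toNat with hM
    have hM2 : 2 ≤ M := by omega
    have hMC : maxCol = (M : Int) - 1 := by omega
    have h0M : 0 < M := by omega
    -- A's value is the iterated row map
    have hA : numWays_dp steps arrLen =
        ((pvRowA maxCol)^[steps.toNat] ((List.replicate M 0).set 0 1)).getD 0 0 := by
      rw [pvA_unfold, ← hmax, ← hM]
      rw [pvTbl_zero ((steps + 1).toNat) M maxCol]
      rw [pvOuter maxCol ((steps + 1).toNat) steps.toNat (by omega)]
      rw [pvTbl_getD _ _ _ _ _ (by omega), if_pos (Nat.le_refl _)]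
    -- B's value is the fast power
    have hB : numWays_dp_alt steps arrLen =
        ((pvFastPow M steps.toNat steps.toNat (pvIdent M) (pvTInit M)).getD 0 []).getD 0 0 := rfl
    -- both cast to (T^steps) 0 0 in ZMod
    have hcastA : ((numWays_dp steps arrLen : Int) : ZMod 1000000007) =
        ((pvToMat M (pvTInit M)) ^ steps.toNat) ⟨0, h0M⟩ ⟨0, h0M⟩ := by
      rw [hA, hMC]
      exact pvIterPow M hM2 h0M steps.toNat ⟨0, h0M⟩
    have hcastB : ((numWays_dp_alt steps arrLen : Int) : ZMod 1000000007) =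
        ((pvToMat M (pvTInit M)) ^ steps.toNat) ⟨0, h0M⟩ ⟨0, h0M⟩ := by
      rw [hB]
      have hent : (((((pvFastPow M steps.toNat steps.toNat (pvIdent M) (pvTInit M)).getD 0 []).getD 0 0 : Int)) : ZMod 1000000007)
          = (pvToMat M (pvFastPow M steps.toNat steps.toNat (pvIdent M) (pvTInit M))) ⟨0, h0M⟩ ⟨0, h0M⟩ := rfl
      rw [hent, pvFastPow_toMat M steps.toNat steps.toNat _ _ (Nat.le_refl _), pvToMat_one, one_mul]
    -- bounds
    have hAb : 0 ≤ numWays_dp steps arrLen ∧ numWays_dp steps arrLen < pvP := by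
      rw [hA]
      cases hn : steps.toNat with
      | zero =>
        rw [Function.iterate_zero, id_eq, List.getD_eq_getElem _ _ (by simp; omega)]
        have : ((List.replicate M (0:Int)).set 0 1)[0]'(by simp; omega) = 1 := by simp
        rw [this]
        norm_num [pvP]
      | succ n =>
        rw [Function.iterate_succ_apply']
        exact pvRowA_getD_bound maxCol _ (by omega)
    have hBb : 0 ≤ numWays_dp_alt steps arrLen ∧ numWays_dp_alt steps arrLen < pvP := by
      rw [hB]
      exact pvFastPow_bound M steps.toNat steps.toNat _ _ (pvIdent_bound M)
    exact pvInt_eq_of_cast _ _ hAb.1 hAb.2 hBb.1 hBb.2 (hcastA.trans hcastB.symm)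
  · -- steps = 0, arrLen = 1
    subst h0; subst h1
    decide
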